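-- pv_equiv track=rewrite | github.com/darknight/algorithms | leetcode/contest_weekly_184/p1411-number-of-ways-to-paint-Nx3-grid.py | WA_numOfWays
-- ===== SOURCE A (Python) =====
-- import math, itertools, functools, heapq, re
--
-- def WA_numOfWays(n: int) -> int:
--     """
--     maximum recursion depth exceeded
--     """
--     state = {
--         1: [2,3,5,6,11,12],
--         2: [1,4,7,9,10,12],
--         3: [1,4,7,8],
--         4: [2,3,8,11],
--         5: [1,7,9,10],
--         6: [1,4,7,8,10,11],
--         7: [2,3,5,6,11,12],
--         8: [3,4,6,12],
--         9: [2,5,10,11],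
--         10: [5,6,9,12],
--         11: [1,4,6,9,12],
--         12: [2,7,8,10,11]
--     }
--
--     @functools.lru_cache(None)
--     def dfs(row: int, s: int) -> int:
--         if row == 1:
--             return 1
--         res = 0
--         for v in state[s]:
--             res += dfs(row-1, v)
--         return res
--
--     total = 0
--     for i in range(1, 13):
--         total += dfs(n, i)
--
--     return total % (10 ** 9 + 7)
-- ===== SOURCE B (Python) =====
-- def WA_numOfWays(n: int) -> int:
--     # Collapse A's 12 row-states into 5 symmetry classes ({1,7},{2,6},{3,5},
--     # {4,8,9,10},{11,12}) and iterate the reduced linear recurrence bottom-up,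
--     # reducing mod 10**9+7 at every step so all integers stay word-sized.
--     MOD = 10 ** 9 + 7
--     a, b, c, d, e = 1, 1, 1, 1, 1
--     for _ in range(n - 1):
--         a, b, c, d, e = ((2 * b + 2 * c + 2 * e) % MOD,
--                          (2 * a + 3 * d + e) % MOD,
--                          (2 * a + 2 * d) % MOD,
--                          (b + c + d + e) % MOD,
--                          (a + b + 2 * d + e) % MOD)
--     return (2 * a + 2 * b + 2 * c + 4 * d + 2 * e) % MOD
-- ===== Notes on version B (the rewrite author's own statement) =====
-- stated objective: faster
-- what changed: B collapses A's 12 row-states into 5 symmetry classes and iterates the reduced linear recurrence bottom-up with mod 10^9+7 at every step, replacing A's memoized top-down recursion over the 12-state adjacency dict whose intermediate big integers grow linearly in n.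
-- outside the precondition, e.g. on WA_numOfWays(470): A returns 768101027, B returns 768101027; on WA_numOfWays(0): A raises RecursionError, B returns 12
import Mathlib
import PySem

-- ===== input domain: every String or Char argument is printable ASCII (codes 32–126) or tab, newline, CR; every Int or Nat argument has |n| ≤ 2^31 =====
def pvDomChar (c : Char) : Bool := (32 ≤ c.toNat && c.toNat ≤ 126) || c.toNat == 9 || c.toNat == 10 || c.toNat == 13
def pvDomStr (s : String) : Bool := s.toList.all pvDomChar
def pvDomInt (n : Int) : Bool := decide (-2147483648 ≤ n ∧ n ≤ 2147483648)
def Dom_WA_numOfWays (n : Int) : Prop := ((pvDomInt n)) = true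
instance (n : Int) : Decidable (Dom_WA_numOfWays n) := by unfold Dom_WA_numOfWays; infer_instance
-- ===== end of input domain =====

-- B replaces A's memoized 12-state top-down recursion by a bottom-up iteration of the
-- 5-symmetry-class linear recurrence with mod 10^9+7 at each step (objective: faster).

-- ===== PORT A =====
-- the adjacency dict 'state'
def stateA (s : Int) : List Int :=
  match s with
  | 1 => [2,3,5,6,11,12]
  | 2 => [1,4,7,9,10,12]
  | 3 => [1,4,7,8]
  | 4 => [2,3,8,11]
  | 5 => [1,7,9,10]
  | 6 => [1,4,7,8,10,11]
  | 7 => [2,3,5,6,11,12]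
  | 8 => [3,4,6,12]
  | 9 => [2,5,10,11]
  | 10 => [5,6,9,12]
  | 11 => [1,4,6,9,12]
  | 12 => [2,7,8,10,11]
  | _ => []   -- Python would raise KeyError; never reached (all entries lie in 1..12)

-- dfs(row, s) with its @functools.lru_cache memo table threaded through as an explicit
-- dict keyed by the arguments; row carried as the Nat n.toNat, which agrees with Python
-- for n ≥ 1 (for n ≤ 0 Python recurses forever — RecursionError — excluded by Pre_;
-- the r = 0 arm is only the fuel guard for that unreachable case).
def dfsM : Nat → Int → PySem.Dict (Nat × Int) Int → Int × PySem.Dict (Nat × Int) Int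
  | r, s, cache =>
    match cache.get? (r, s) with
    | some v => (v, cache)
    | none =>
      match r with
      | 0 => (1, cache.insert (0, s) 1)
      | 1 => (1, cache.insert (1, s) 1)
      | q+2 =>
        let rc := (stateA s).foldl
          (fun p v =>
            let xc := dfsM (q+1) v p.2
            (p.1 + xc.1, xc.2)) ((0 : Int), cache)
        (rc.1, rc.2.insert (q+2, s) rc.1)

def WA_numOfWays (n : Int) : Int :=
  (((PySem.List.pyRange 1 13 1).foldl
      (fun p i => let xc := dfsM n.toNat i p.2; (p.1 + xc.1, xc.2))
      ((0 : Int), PySem.Dict.empty)).1) % (10 ^ 9 + 7)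

-- ===== PORT B =====
def stepB (v : Int × Int × Int × Int × Int) : Int × Int × Int × Int × Int :=
  match v with
  | (a, b, c, d, e) =>
    ((2*b + 2*c + 2*e) % 1000000007,
     (2*a + 3*d + e) % 1000000007,
     (2*a + 2*d) % 1000000007,
     (b + c + d + e) % 1000000007,
     (a + b + 2*d + e) % 1000000007)

-- the 'for _ in range(n-1)' loop
def iterB : Nat → (Int × Int × Int × Int × Int) → (Int × Int × Int × Int × Int)
  | 0, v => v
  | k+1, v => iterB k (stepB v)

def WA_numOfWays_alt (n : Int) : Int :=
  match iterB (n - 1).toNat (1, 1, 1, 1, 1) with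
  | (a, b, c, d, e) => (2*a + 2*b + 2*c + 4*d + 2*e) % 1000000007

-- ===== PRECONDITION & SPEC =====
-- Pre_ excludes the inputs on which A raises RecursionError: for n ≤ 0 A's dfs never
-- reaches its base case row == 1 and always raises; and each row costs two stack frames
-- (dfs plus its lru_cache wrapper), so large n exhausts CPython's recursion limit —
-- under the default limit of 1000 that happens just below n = 500, the exact threshold
-- depending on the configured limit and the caller's stack depth. The upper bound 450
-- stays below the default-limit threshold with a small margin, nothing more.
def Pre_WA_numOfWays (n : Int) : Prop := 1 ≤ n ∧ n ≤ 450
instance (n : Int) : Decidable (Pre_WA_numOfWays n) := by unfold Pre_WA_numOfWays; infer_instance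
def pvWitness_WA_numOfWays : Int := (3)

def Spec_WA_numOfWays (n : Int) (out : Int) : Prop := out = WA_numOfWays_alt n
instance (n : Int) (out : Int) : Decidable (Spec_WA_numOfWays n out) := by unfold Spec_WA_numOfWays; infer_instance

-- ===== CLAIM (what is proved, stated in full; the proofs are below) =====
def Claim_equal_WA_numOfWays : Prop := ∀ (n : Int), Dom_WA_numOfWays n → Pre_WA_numOfWays n → Spec_WA_numOfWays n (WA_numOfWays n)

-- ===== LEMMAS AND PROOFS =====

-- proof-side model of dfs: the same recursion without the memo table
def dfsA : Nat → Int → Int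
  | 0, _ => 1
  | 1, _ => 1
  | r+2, s => (stateA s).foldl (fun res v => res + dfsA (r+1) v) 0

theorem dfsA_succ_succ (r : Nat) (s : Int) :
    dfsA (r+1+1) s = (stateA s).foldl (fun res v => res + dfsA (r+1) v) 0 := rfl

theorem foldl_add_sum (f : Int → Int) (L : List Int) : ∀ (a : Int),
    L.foldl (fun res v => res + f v) a = a + (L.map f).sum := by
  induction L with
  | nil => intro a; simp
  | cons x L ih => intro a; simp only [List.foldl, List.map, List.sum_cons]; rw [ih]; ring

theorem dfsA_sum (q : Nat) (s : Int) :
    dfsA (q+1+1) s = ((stateA s).map (dfsA (q+1))).sum := by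
  rw [dfsA_succ_succ, foldl_add_sum]; ring

-- A's dfs values depend only on the symmetry class of the state:
-- {1,7}, {2,6}, {3,5}, {4,8,9,10}, {11,12}.
theorem dfsA_classEq (k : Nat) :
    dfsA (k+1) 7 = dfsA (k+1) 1 ∧ dfsA (k+1) 6 = dfsA (k+1) 2 ∧ dfsA (k+1) 5 = dfsA (k+1) 3 ∧
    dfsA (k+1) 8 = dfsA (k+1) 4 ∧ dfsA (k+1) 9 = dfsA (k+1) 4 ∧ dfsA (k+1) 10 = dfsA (k+1) 4 ∧
    dfsA (k+1) 12 = dfsA (k+1) 11 := by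
  induction k with
  | zero => simp [dfsA]
  | succ j ih =>
    obtain ⟨h7, h6, h5, h8, h9, h10, h12⟩ := ih
    simp only [dfsA_succ_succ, stateA, List.foldl]
    refine ⟨?_, ?_, ?_, ?_, ?_, ?_, ?_⟩ <;> (first | trivial | linarith)

-- one dfs step on the class representatives
theorem dfsA_step (k : Nat) :
    dfsA (k+1+1) 1 = 2 * dfsA (k+1) 2 + 2 * dfsA (k+1) 3 + 2 * dfsA (k+1) 11 ∧
    dfsA (k+1+1) 2 = 2 * dfsA (k+1) 1 + 3 * dfsA (k+1) 4 + dfsA (k+1) 11 ∧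
    dfsA (k+1+1) 3 = 2 * dfsA (k+1) 1 + 2 * dfsA (k+1) 4 ∧
    dfsA (k+1+1) 4 = dfsA (k+1) 2 + dfsA (k+1) 3 + dfsA (k+1) 4 + dfsA (k+1) 11 ∧
    dfsA (k+1+1) 11 = dfsA (k+1) 1 + dfsA (k+1) 2 + 2 * dfsA (k+1) 4 + dfsA (k+1) 11 := by
  obtain ⟨h7, h6, h5, h8, h9, h10, h12⟩ := dfsA_classEq k
  simp only [dfsA_succ_succ, stateA, List.foldl]
  refine ⟨?_, ?_, ?_, ?_, ?_⟩ <;> (first | trivial | linarith)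

theorem iterB_succ (k : Nat) (v : Int × Int × Int × Int × Int) :
    iterB (k+1) v = stepB (iterB k v) := by
  induction k generalizing v with
  | zero => rfl
  | succ j ih => rw [iterB, ih]; rfl

-- B's loop state after k steps = A's class representatives at row k+1, reduced mod p
theorem iterB_eq (k : Nat) :
    iterB k (1, 1, 1, 1, 1) =
      (dfsA (k+1) 1 % 1000000007, dfsA (k+1) 2 % 1000000007, dfsA (k+1) 3 % 1000000007,
       dfsA (k+1) 4 % 1000000007, dfsA (k+1) 11 % 1000000007) := by
  induction k with
  | zero => simp [iterB, dfsA]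
  | succ j ih =>
    obtain ⟨s1, s2, s3, s4, s11⟩ := dfsA_step j
    rw [iterB_succ, ih]
    simp only [stepB, Prod.mk.injEq]
    refine ⟨?_, ?_, ?_, ?_, ?_⟩ <;> omega

-- the memo-table invariant: every cached value is the pure dfs value
def GoodC (c : PySem.Dict (Nat × Int) Int) : Prop :=
  ∀ (r : Nat) (s : Int) (v : Int), c.get? (r, s) = some v → v = dfsA r s

theorem goodC_empty : GoodC PySem.Dict.empty := by
  intro r s v h
  simp [PySem.Dict.get?_empty] at h

theorem goodC_insert {c : PySem.Dict (Nat × Int) Int} {r : Nat} {s v : Int}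
    (hc : GoodC c) (hv : v = dfsA r s) : GoodC (c.insert (r, s) v) := by
  intro r' s' v' h
  rw [PySem.Dict.get?_insert] at h
  split_ifs at h with hk
  · injection hk with hr hs
    subst hr; subst hs
    injection h with h
    rw [← h]; exact hv
  · exact hc r' s' v' h

-- the dfs loop 'for v in state[s]: res += dfs(row-1, v)' with the cache threaded through
theorem dfsM_fold (q : Nat)
    (IH : ∀ (v : Int) c, GoodC c →
      (dfsM (q+1) v c).1 = dfsA (q+1) v ∧ GoodC (dfsM (q+1) v c).2) :
    ∀ (L : List Int) (acc : Int) (c : PySem.Dict (Nat × Int) Int), GoodC c →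
      (L.foldl (fun p v => let xc := dfsM (q+1) v p.2; (p.1 + xc.1, xc.2)) (acc, c)).1
          = acc + (L.map (dfsA (q+1))).sum ∧
      GoodC (L.foldl (fun p v => let xc := dfsM (q+1) v p.2; (p.1 + xc.1, xc.2)) (acc, c)).2 := by
  intro L
  induction L with
  | nil => intro acc c hc; exact ⟨by simp, hc⟩
  | cons x L ihL =>
    intro acc c hc
    obtain ⟨h1, h2⟩ := IH x c hc
    obtain ⟨g1, g2⟩ := ihL (acc + (dfsM (q+1) x c).1) (dfsM (q+1) x c).2 h2
    simp only [List.foldl, List.map, List.sum_cons]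
    exact ⟨by rw [g1, h1]; ring, g2⟩

-- memoization is sound: dfsM returns the pure dfs value and preserves the invariant
theorem dfsM_hit (r : Nat) (s : Int) (c : PySem.Dict (Nat × Int) Int) (v : Int)
    (h : c.get? (r, s) = some v) : dfsM r s c = (v, c) := by
  rw [dfsM.eq_def]; dsimp only; rw [h]

theorem dfsM_miss0 (s : Int) (c : PySem.Dict (Nat × Int) Int)
    (h : c.get? (0, s) = none) : dfsM 0 s c = (1, c.insert (0, s) 1) := by
  rw [dfsM.eq_def]; dsimp only; rw [h]

theorem dfsM_miss1 (s : Int) (c : PySem.Dict (Nat × Int) Int)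
    (h : c.get? (1, s) = none) : dfsM 1 s c = (1, c.insert (1, s) 1) := by
  rw [dfsM.eq_def]; dsimp only; rw [h]

theorem dfsM_miss2 (q : Nat) (s : Int) (c : PySem.Dict (Nat × Int) Int)
    (h : c.get? (q+2, s) = none) :
    dfsM (q+2) s c =
      ((((stateA s).foldl (fun p v => let xc := dfsM (q+1) v p.2; (p.1 + xc.1, xc.2)) ((0 : Int), c)).1),
       (((stateA s).foldl (fun p v => let xc := dfsM (q+1) v p.2; (p.1 + xc.1, xc.2)) ((0 : Int), c)).2).insert (q+2, s)
         (((stateA s).foldl (fun p v => let xc := dfsM (q+1) v p.2; (p.1 + xc.1, xc.2)) ((0 : Int), c)).1)) := by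
  rw [dfsM.eq_def]; dsimp only; rw [h]

theorem dfsM_spec (r : Nat) : ∀ (s : Int) (c : PySem.Dict (Nat × Int) Int), GoodC c →
    (dfsM r s c).1 = dfsA r s ∧ GoodC (dfsM r s c).2 := by
  induction r using Nat.strong_induction_on with
  | _ r IH =>
    intro s c hc
    cases hget : c.get? (r, s) with
    | some v =>
      rw [dfsM_hit r s c v hget]
      exact ⟨hc r s v hget, hc⟩
    | none =>
      revert hget
      rcases r with _ | r
      · intro hget
        rw [dfsM_miss0 s c hget]
        exact ⟨rfl, goodC_insert hc rfl⟩
      rcases r with _ | q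
      · intro hget
        rw [dfsM_miss1 s c hget]
        exact ⟨rfl, goodC_insert hc rfl⟩
      · intro hget
        have IH' : ∀ (v : Int) c, GoodC c →
            (dfsM (q+1) v c).1 = dfsA (q+1) v ∧ GoodC (dfsM (q+1) v c).2 :=
          fun v c hc => IH (q+1) (by omega) v c hc
        obtain ⟨h1, h2⟩ := dfsM_fold q IH' (stateA s) 0 c hc
        have hval : ((stateA s).foldl
            (fun p v => let xc := dfsM (q+1) v p.2; (p.1 + xc.1, xc.2)) ((0 : Int), c)).1
              = dfsA (q+1+1) s := by rw [h1, dfsA_sum]; ring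
        rw [dfsM_miss2 q s c hget]
        refine ⟨hval, goodC_insert h2 ?_⟩
        exact hval

-- ===== VERDICT (by name: the statement is the Claim_ definition above) =====
theorem WA_numOfWays_spec : Claim_equal_WA_numOfWays := by
  intro n _ hpre
  obtain ⟨hn1, _⟩ := hpre
  have hk : n.toNat = (n - 1).toNat + 1 := by omega
  have hrange : PySem.List.pyRange 1 13 1 = [1,2,3,4,5,6,7,8,9,10,11,12] := by decide
  obtain ⟨h7, h6, h5, h8, h9, h10, h12⟩ := dfsA_classEq (n - 1).toNat
  have IH' : ∀ (v : Int) c, GoodC c →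
      (dfsM ((n-1).toNat + 1) v c).1 = dfsA ((n-1).toNat + 1) v ∧
      GoodC (dfsM ((n-1).toNat + 1) v c).2 :=
    fun v c hc => dfsM_spec ((n-1).toNat + 1) v c hc
  obtain ⟨h1, _⟩ := dfsM_fold ((n-1).toNat) IH'
    [1,2,3,4,5,6,7,8,9,10,11,12] 0 PySem.Dict.empty goodC_empty
  unfold Spec_WA_numOfWays WA_numOfWays WA_numOfWays_alt
  rw [hrange]
  simp only [hk]
  rw [h1, iterB_eq]
  simp only [List.map, List.sum_cons, List.sum_nil]
  omega
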